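-- pv_equiv track=rewrite | github.com/VenziVi/CA_Course | Python-Course/3.Functions/Lecture/Lecture_2.py | camel_to_any_case
-- ===== SOURCE A (Python) =====
-- import string
--
-- def camel_to_any_case(text, separator="_"):
--     result_text = []
--     result_text.append(text[0].lower())
--
--     for letter in text[1:]:
--         if letter in (string.ascii_uppercase):
--             result_text.append(separator)
--
--         result_text.append(letter.lower())
--
--     return "".join(result_text)
-- ===== SOURCE B (Python) =====
-- def camel_to_any_case(text, separator="_"):
--     # tokenize into words (a new word starts at each later uppercase letter), then join
--     words = []
--     current = text[0]
--     for ch in text[1:]: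
--         if "A" <= ch <= "Z":
--             words.append(current)
--             current = ch
--         else:
--             current += ch
--     words.append(current)
--     return separator.join(word.lower() for word in words)
-- ===== Notes on version B (the rewrite author's own statement) =====
-- stated objective: idiomatic
-- what changed: Replaces A's insert-separator-while-scanning char-append loop with a two-phase tokenize-then-join: split the string into words at each later uppercase letter, then separator.join the lowercased words.
-- outside the precondition, e.g. on camel_to_any_case('', '_'): A raises IndexError, B raises IndexError
import Mathlib
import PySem

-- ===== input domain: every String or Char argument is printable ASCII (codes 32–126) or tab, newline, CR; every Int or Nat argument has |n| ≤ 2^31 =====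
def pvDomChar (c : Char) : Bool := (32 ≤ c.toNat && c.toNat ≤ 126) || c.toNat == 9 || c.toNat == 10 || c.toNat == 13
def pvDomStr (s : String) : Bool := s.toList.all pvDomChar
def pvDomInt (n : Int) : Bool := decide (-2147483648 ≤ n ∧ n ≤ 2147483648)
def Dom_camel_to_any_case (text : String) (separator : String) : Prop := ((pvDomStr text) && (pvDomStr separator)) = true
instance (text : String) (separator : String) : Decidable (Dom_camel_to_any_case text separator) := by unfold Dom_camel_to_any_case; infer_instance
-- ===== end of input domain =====

-- B replaces A's insert-separator-while-scanning loop by tokenize-then-join (same O(n) cost, more idiomatic).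

-- ===== PORT A =====
-- string.ascii_uppercase
def asciiUppercase : List Char :=
  ['A','B','C','D','E','F','G','H','I','J','K','L','M','N','O','P','Q','R','S','T','U','V','W','X','Y','Z']

-- A appends lowered characters (and a separator before each later uppercase letter)
-- to a list of pieces, then "".joins it.
def camel_to_any_case (text : String) (separator : String) : String :=
  match PySem.Str.pyGet? text 0 with
  | none => ""   -- text[0] raises IndexError on empty text; excluded by Pre_
  | some c0 =>
    String.mk (PySem.Chars.join []
      (((PySem.Str.slice text (some 1) none).toList).foldl
        (fun acc letter =>
          (if letter ∈ asciiUppercase then acc ++ [separator.toList] else acc)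
            ++ [PySem.Chars.lower [letter]])
        [PySem.Chars.lower [c0]]))

-- ===== PORT B =====
-- B tokenizes the string into words (a new word starts at each later uppercase
-- letter), then joins the lowered words with the separator.
def camel_to_any_case_alt (text : String) (separator : String) : String :=
  match PySem.Str.pyGet? text 0 with
  | none => ""   -- text[0] raises IndexError on empty text; excluded by Pre_
  | some c0 =>
    let st :=
      ((PySem.Str.slice text (some 1) none).toList).foldl
        (fun st ch =>
          if 'A' ≤ ch ∧ ch ≤ 'Z' then (st.1 ++ [st.2], [ch]) else (st.1, st.2 ++ [ch]))
        (([] : List (List Char)), [c0])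
    String.mk (PySem.Chars.join separator.toList ((st.1 ++ [st.2]).map PySem.Chars.lower))

-- ===== PRECONDITION & SPEC =====
-- A (and B) evaluate text[0] and raise IndexError on the empty string; only that is excluded.
def Pre_camel_to_any_case (text : String) (separator : String) : Prop := text ≠ ""
instance (text : String) (separator : String) : Decidable (Pre_camel_to_any_case text separator) := by unfold Pre_camel_to_any_case; infer_instance
def pvWitness_camel_to_any_case : String × String := ("camelCaseText", "_")

def Spec_camel_to_any_case (text : String) (separator : String) (out : String) : Prop := out = camel_to_any_case_alt text separator
instance (text : String) (separator : String) (out : String) : Decidable (Spec_camel_to_any_case text separator out) := by unfold Spec_camel_to_any_case; infer_instance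

-- ===== CLAIM (what is proved, stated in full; the proofs are below) =====
def Claim_equal_camel_to_any_case : Prop := ∀ (text : String) (separator : String), Dom_camel_to_any_case text separator → Pre_camel_to_any_case text separator → Spec_camel_to_any_case text separator (camel_to_any_case text separator)

-- ===== LEMMAS AND PROOFS =====

theorem char_eq_iff (c d : Char) : c = d ↔ c.val.toNat = d.val.toNat :=
  ⟨fun h => by rw [h], fun h => Char.ext (UInt32.toNat_inj.mp h)⟩

set_option maxHeartbeats 1000000 in
theorem upper_iff (c : Char) : c ∈ asciiUppercase ↔ ('A' ≤ c ∧ c ≤ 'Z') := by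
  simp only [asciiUppercase, List.mem_cons, List.not_mem_nil, or_false, char_eq_iff,
    Char.le_def, UInt32.le_iff_toNat_le]
  have h65 : ('A'.val.toNat) = 65 := rfl
  have h66 : ('B'.val.toNat) = 66 := rfl
  have h67 : ('C'.val.toNat) = 67 := rfl
  have h68 : ('D'.val.toNat) = 68 := rfl
  have h69 : ('E'.val.toNat) = 69 := rfl
  have h70 : ('F'.val.toNat) = 70 := rfl
  have h71 : ('G'.val.toNat) = 71 := rfl
  have h72 : ('H'.val.toNat) = 72 := rfl
  have h73 : ('I'.val.toNat) = 73 := rfl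
  have h74 : ('J'.val.toNat) = 74 := rfl
  have h75 : ('K'.val.toNat) = 75 := rfl
  have h76 : ('L'.val.toNat) = 76 := rfl
  have h77 : ('M'.val.toNat) = 77 := rfl
  have h78 : ('N'.val.toNat) = 78 := rfl
  have h79 : ('O'.val.toNat) = 79 := rfl
  have h80 : ('P'.val.toNat) = 80 := rfl
  have h81 : ('Q'.val.toNat) = 81 := rfl
  have h82 : ('R'.val.toNat) = 82 := rfl
  have h83 : ('S'.val.toNat) = 83 := rfl
  have h84 : ('T'.val.toNat) = 84 := rfl
  have h85 : ('U'.val.toNat) = 85 := rfl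
  have h86 : ('V'.val.toNat) = 86 := rfl
  have h87 : ('W'.val.toNat) = 87 := rfl
  have h88 : ('X'.val.toNat) = 88 := rfl
  have h89 : ('Y'.val.toNat) = 89 := rfl
  have h90 : ('Z'.val.toNat) = 90 := rfl
  omega

theorem join_snoc (sep y : List Char) (xs : List (List Char)) (h : xs ≠ []) :
    PySem.Chars.join sep (xs ++ [y]) = PySem.Chars.join sep xs ++ sep ++ y := by
  induction xs with
  | nil => exact absurd rfl h
  | cons x xs ih =>
    cases xs with
    | nil => simp [PySem.Chars.join_cons_cons, PySem.Chars.join_singleton]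
    | cons x2 xs2 =>
      rw [List.cons_append, PySem.Chars.join_cons_cons,
        show (x2 :: xs2) ++ [y] = x2 :: (xs2 ++ [y]) from rfl] at *
      rw [PySem.Chars.join_cons_cons, ih (by simp)]
      simp [List.append_assoc]

theorem join_last_append (sep u v : List Char) (W : List (List Char)) :
    PySem.Chars.join sep (W ++ [u ++ v]) = PySem.Chars.join sep (W ++ [u]) ++ v := by
  cases hW : W with
  | nil => simp [PySem.Chars.join_singleton]
  | cons w W2 =>
    rw [join_snoc sep (u ++ v) (w :: W2) (by simp), join_snoc sep u (w :: W2) (by simp)]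
    simp [List.append_assoc]

theorem camel_loop (sep : List Char) (l : List Char) :
    ∀ (acc : List (List Char)) (ws : List (List Char)) (cur : List Char),
    acc ≠ [] →
    PySem.Chars.join [] acc = PySem.Chars.join sep ((ws ++ [cur]).map PySem.Chars.lower) →
    PySem.Chars.join []
        (l.foldl (fun acc letter =>
            (if letter ∈ asciiUppercase then acc ++ [sep] else acc)
              ++ [PySem.Chars.lower [letter]]) acc)
      = PySem.Chars.join sep
          (((l.foldl (fun st ch =>
              if 'A' ≤ ch ∧ ch ≤ 'Z' then (st.1 ++ [st.2], [ch]) else (st.1, st.2 ++ [ch]))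
              (ws, cur)).1
            ++ [(l.foldl (fun st ch =>
              if 'A' ≤ ch ∧ ch ≤ 'Z' then (st.1 ++ [st.2], [ch]) else (st.1, st.2 ++ [ch]))
              (ws, cur)).2]).map PySem.Chars.lower) := by
  induction l with
  | nil => intro acc ws cur _ hinv; simpa using hinv
  | cons ch l ih =>
    intro acc ws cur hne hinv
    simp only [List.foldl_cons]
    by_cases hch : 'A' ≤ ch ∧ ch ≤ 'Z'
    · rw [if_pos ((upper_iff ch).mpr hch), if_pos hch]
      refine ih ((acc ++ [sep]) ++ [PySem.Chars.lower [ch]]) (ws ++ [cur]) [ch] (by simp) ?_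
      rw [join_snoc [] (PySem.Chars.lower [ch]) (acc ++ [sep]) (by simp [hne]),
        join_snoc [] sep acc hne]
      have hmap : ((ws ++ [cur]) ++ [[ch]]).map PySem.Chars.lower
          = ((ws ++ [cur]).map PySem.Chars.lower) ++ [PySem.Chars.lower [ch]] := by
        simp
      rw [hmap, join_snoc sep (PySem.Chars.lower [ch]) ((ws ++ [cur]).map PySem.Chars.lower) (by simp),
        ← hinv]
      simp
    · rw [if_neg (fun hmem => hch ((upper_iff ch).mp hmem)), if_neg hch]
      refine ih (acc ++ [PySem.Chars.lower [ch]]) ws (cur ++ [ch]) (by simp [hne]) ?_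
      rw [join_snoc [] (PySem.Chars.lower [ch]) acc hne]
      have hlow : PySem.Chars.lower (cur ++ [ch]) = PySem.Chars.lower cur ++ PySem.Chars.lower [ch] := by
        simp [PySem.Chars.lower]
      have hmap : (ws ++ [cur ++ [ch]]).map PySem.Chars.lower
          = (ws.map PySem.Chars.lower) ++ [PySem.Chars.lower cur ++ PySem.Chars.lower [ch]] := by
        simp [hlow]
      rw [hmap, join_last_append sep (PySem.Chars.lower cur) (PySem.Chars.lower [ch]) (ws.map PySem.Chars.lower)]
      have hmap2 : (ws ++ [cur]).map PySem.Chars.lower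
          = (ws.map PySem.Chars.lower) ++ [PySem.Chars.lower cur] := by simp
      rw [← hmap2, ← hinv]
      simp

-- ===== VERDICT (by name: the statement is the Claim_ definition above) =====
theorem camel_to_any_case_spec : Claim_equal_camel_to_any_case := by
  intro text separator _hdom hpre
  unfold Spec_camel_to_any_case
  obtain ⟨c, cs, h⟩ : ∃ c cs, text.toList = c :: cs := by
    cases hl : text.toList with
    | nil => exact absurd (String.toList_inj.mp (by rw [hl]; rfl)) hpre
    | cons c cs => exact ⟨c, cs, rfl⟩
  have hg : PySem.Str.pyGet? text 0 = some c := by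
    simp [PySem.Str.pyGet?, h]
  have hs : (PySem.Str.slice text (some 1) none).toList = cs := by
    simp [PySem.Str.slice, h, PySem.List.slice_from_one]
  unfold camel_to_any_case camel_to_any_case_alt
  rw [hg]
  simp only [hs]
  exact congrArg String.mk
    (camel_loop separator.toList cs [PySem.Chars.lower [c]] [] [c] (by simp)
      (by simp [PySem.Chars.join_singleton]))
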